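-- pv_equiv track=rewrite | github.com/ygritte723/perturbed_vlm | evaluation/shuffled_matching/utils.py | swap_adjacent_words
-- ===== SOURCE A (Python) =====
-- def swap_adjacent_words(ex):
--     """
--     Swap adjacent words in the sentence.
--     """
--     words = ex.split()
--     swapped_sentence = []
--     i = 0
--     while i < len(words):
--         if i + 1 < len(words):
--             swapped_sentence.append(words[i + 1])
--             swapped_sentence.append(words[i])
--             i += 2
--         else:
--             swapped_sentence.append(words[i])
--             i += 1
--     return " ".join(swapped_sentence)
-- ===== SOURCE B (Python) =====
-- def swap_adjacent_words(ex):
--     """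
--     Swap adjacent words in the sentence.
--     """
--     words = ex.split()
--     evens = words[0::2]
--     odds = words[1::2]
--     out = []
--     for o, e in zip(odds, evens):
--         out.append(o)
--         out.append(e)
--     if len(odds) < len(evens):
--         out.append(evens[-1])
--     return " ".join(out)
-- ===== Notes on version B (the rewrite author's own statement) =====
-- stated objective: alternative
-- what changed: Replaces the index-stepped while-loop with its odd-case branch by a parity partition (words[0::2] / words[1::2]) interleaved via zip, appending the unpaired trailing word when the even slice is longer.
import Mathlib
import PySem

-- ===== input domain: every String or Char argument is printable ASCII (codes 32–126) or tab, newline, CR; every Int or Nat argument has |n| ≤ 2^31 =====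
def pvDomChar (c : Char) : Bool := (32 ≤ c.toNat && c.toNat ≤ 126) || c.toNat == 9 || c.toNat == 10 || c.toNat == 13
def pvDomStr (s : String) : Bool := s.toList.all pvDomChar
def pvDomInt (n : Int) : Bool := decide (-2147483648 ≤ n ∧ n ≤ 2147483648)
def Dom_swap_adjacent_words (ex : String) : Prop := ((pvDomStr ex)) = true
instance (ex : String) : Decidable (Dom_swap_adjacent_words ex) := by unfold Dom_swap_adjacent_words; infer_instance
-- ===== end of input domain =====

-- B replaces A's index-stepped while-loop (with its odd-leftover branch) by a
-- parity partition of the word list interleaved via zip: a different decomposition, same cost.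


-- ===== PORT A =====
-- A's while loop over index i (i += 2 in the pair branch, i += 1 in the odd leftover branch)
def swapLoopA (words : List String) (i : Nat) (acc : List String) : List String :=
  if i < words.length then
    if i + 1 < words.length then
      swapLoopA words (i + 2) (acc ++ [words[i + 1]!, words[i]!])
    else
      swapLoopA words (i + 1) (acc ++ [words[i]!])
  else acc
termination_by words.length - i

def swap_adjacent_words (ex : String) : String :=
  PySem.Str.join " " (swapLoopA (PySem.Str.split₀ ex) 0 [])

-- ===== PORT B =====
-- words[0::2] / words[1::2]: every second element (step-2 slice, exact on lists)
def everyOther : List String → List String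
  | [] => []
  | [x] => [x]
  | x :: _ :: rest => x :: everyOther rest

def swap_adjacent_words_alt (ex : String) : String :=
  let words := PySem.Str.split₀ ex
  let evens := everyOther words
  let odds := everyOther words.tail
  let out := (odds.zip evens).foldl (fun acc p => acc ++ [p.1, p.2]) []
  let out := if odds.length < evens.length then out ++ (PySem.List.pyGet? evens (-1)).toList else out
  PySem.Str.join " " out

-- ===== PRECONDITION & SPEC =====
def Spec_swap_adjacent_words (ex : String) (out : String) : Prop := out = swap_adjacent_words_alt ex
instance (ex : String) (out : String) : Decidable (Spec_swap_adjacent_words ex out) := by unfold Spec_swap_adjacent_words; infer_instance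

-- ===== CLAIM (what is proved, stated in full; the proofs are below) =====
def Claim_equal_swap_adjacent_words : Prop := ∀ (ex : String), Dom_swap_adjacent_words ex → Spec_swap_adjacent_words ex (swap_adjacent_words ex)

-- ===== LEMMAS AND PROOFS =====

-- reference pair-swapper used only in the proofs
def core : List String → List String
  | [] => []
  | [x] => [x]
  | x :: y :: rest => y :: x :: core rest

theorem swapLoopA_drop (n : Nat) :
    ∀ (ws : List String) (i : Nat) (acc : List String), ws.length - i ≤ n →
      swapLoopA ws i acc = acc ++ core (ws.drop i) := by
  induction n with
  | zero =>
    intro ws i acc h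
    unfold swapLoopA
    have hd : List.drop i ws = [] := List.drop_of_length_le (by omega)
    have hi : ¬ i < ws.length := by omega
    rw [if_neg hi, hd]
    simp [core]
  | succ n ih =>
    intro ws i acc h
    unfold swapLoopA
    by_cases hi : i < ws.length
    · by_cases hi1 : i + 1 < ws.length
      · rw [if_pos hi, if_pos hi1, ih ws (i + 2) _ (by omega)]
        have hd : ws.drop i = ws[i] :: ws[i + 1] :: ws.drop (i + 2) := by
          rw [List.drop_eq_getElem_cons hi]
          congr 1
          rw [List.drop_eq_getElem_cons hi1]
        rw [hd, getElem!_pos ws (i + 1) hi1, getElem!_pos ws i hi]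
        simp [core]
      · rw [if_pos hi, if_neg hi1, ih ws (i + 1) _ (by omega)]
        have hd : ws.drop i = [ws[i]] := by
          rw [List.drop_eq_getElem_cons hi, List.drop_of_length_le (by omega)]
        have hd1 : List.drop (i + 1) ws = [] := List.drop_of_length_le (by omega)
        rw [hd, hd1, getElem!_pos ws i hi]
        simp [core]
    · have hd : List.drop i ws = [] := List.drop_of_length_le (by omega)
      rw [if_neg hi, hd]
      simp [core]

theorem foldl_pairs (l : List (String × String)) (acc : List String) :
    l.foldl (fun acc p => acc ++ [p.1, p.2]) acc
      = acc ++ l.foldl (fun acc p => acc ++ [p.1, p.2]) [] := by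
  induction l generalizing acc with
  | nil => simp
  | cons p t ih => simp [List.foldl, ih (acc ++ [p.1, p.2]), ih [p.1, p.2]]

theorem alt_core (ws : List String) :
    (((everyOther ws.tail).zip (everyOther ws)).foldl (fun acc p => acc ++ [p.1, p.2]) [] ++
      (if (everyOther ws.tail).length < (everyOther ws).length
        then (everyOther ws).getLast?.toList else []))
      = core ws := by
  induction ws using core.induct with
  | case1 => simp [everyOther, core]
  | case2 x => simp [everyOther, core]
  | case3 x y rest ih =>
    have he : everyOther (x :: y :: rest) = x :: everyOther rest := rfl
    have ho : everyOther (x :: y :: rest).tail = y :: everyOther rest.tail := by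
      cases rest <;> rfl
    rw [he, ho]
    simp only [List.zip_cons_cons, List.foldl, List.length_cons, Nat.add_lt_add_iff_right]
    rw [foldl_pairs]
    by_cases hc : (everyOther rest.tail).length < (everyOther rest).length
    · rw [if_pos hc] at ih ⊢
      have hlast : (x :: everyOther rest).getLast? = (everyOther rest).getLast? := by
        cases hr : everyOther rest with
        | nil => rw [hr] at hc; simp at hc
        | cons a t => rw [List.getLast?_cons_cons]
      rw [hlast]
      simp [core, ← ih]
    · rw [if_neg hc] at ih ⊢
      simp at ih
      simp [core, ← ih]

-- ===== VERDICT (by name: the statement is the Claim_ definition above) =====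
theorem swap_adjacent_words_spec : Claim_equal_swap_adjacent_words := by
  intro ex _
  unfold Spec_swap_adjacent_words swap_adjacent_words swap_adjacent_words_alt
  rw [swapLoopA_drop (PySem.Str.split₀ ex).length _ 0 [] (by omega)]
  simp only [List.drop_zero, List.nil_append, PySem.List.pyGet?_neg_one]
  congr 1
  rw [← alt_core (PySem.Str.split₀ ex)]
  split <;> simp
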